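-- pv_equiv track=rewrite | github.com/amirhaa/python-bootcamp-makeen-ninth | Mana/data_stracture.py | lower_upper_string
-- ===== SOURCE A (Python) =====
-- def lower_upper_string(string):
--     lower = ""
--     upper = ""
--     for ch in string:
--         if ch == ch.lower():
--             lower += ch
--         else:
--             upper += ch
--     return lower+upper
-- ===== SOURCE B (Python) =====
-- def lower_upper_string(string):
--     return "".join(sorted(string, key=lambda ch: 0 if ch == ch.lower() else 1))
-- ===== Notes on version B (the rewrite author's own statement) =====
-- stated objective: idiomatic
-- what changed: Replaces A's explicit two-accumulator partition loop with a single stable sort by a 0/1 key (0 for ch == ch.lower(), 1 otherwise) joined into a string.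
import Mathlib
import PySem

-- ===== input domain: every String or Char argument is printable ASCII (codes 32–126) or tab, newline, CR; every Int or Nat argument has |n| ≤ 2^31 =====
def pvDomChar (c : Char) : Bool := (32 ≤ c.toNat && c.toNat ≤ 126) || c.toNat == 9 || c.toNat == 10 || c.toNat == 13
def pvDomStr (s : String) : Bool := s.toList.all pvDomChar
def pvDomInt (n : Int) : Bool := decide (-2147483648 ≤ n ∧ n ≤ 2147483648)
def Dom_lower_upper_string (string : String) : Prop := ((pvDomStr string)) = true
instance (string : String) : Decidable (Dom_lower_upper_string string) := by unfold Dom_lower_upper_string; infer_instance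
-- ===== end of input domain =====

-- B replaces A's explicit two-accumulator partition loop with one stable sort by a 0/1 key (idiomatic one-liner, same result).

-- ===== PORT A =====
-- strings are handled as their character lists; '+=' on a string becomes '++ [ch]' on the list
def lower_upper_string (string : String) : String :=
  let r := string.toList.foldl
    (fun (acc : List Char × List Char) ch =>
      if ch == PySem.Chars.lowerChar ch then (acc.1 ++ [ch], acc.2) else (acc.1, acc.2 ++ [ch]))
    ([], [])
  String.ofList (r.1 ++ r.2)

-- ===== PORT B =====
-- the sort key: 0 for ch == ch.lower(), 1 otherwise
def pvKey (ch : Char) : Int := if ch == PySem.Chars.lowerChar ch then 0 else 1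

def lower_upper_string_alt (string : String) : String :=
  String.ofList (PySem.List.sorted string.toList pvKey false)

-- ===== PRECONDITION & SPEC =====
def Spec_lower_upper_string (string : String) (out : String) : Prop := out = lower_upper_string_alt string
instance (string : String) (out : String) : Decidable (Spec_lower_upper_string string out) := by unfold Spec_lower_upper_string; infer_instance

-- ===== CLAIM (what is proved, stated in full; the proofs are below) =====
def Claim_equal_lower_upper_string : Prop := ∀ (string : String), Dom_lower_upper_string string → Spec_lower_upper_string string (lower_upper_string string)

-- ===== LEMMAS AND PROOFS =====

theorem pvKey_le_one (a : Char) : pvKey a ≤ 1 := by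
  unfold pvKey; split_ifs <;> norm_num

-- inserting a key-0 element into (key-0 block ++ key-1 block) puts it at the end of the key-0 block
theorem pvIns0 (x : Char) (hx : pvKey x = 0) :
    ∀ (L U : List Char), (∀ a ∈ L, pvKey a = 0) → (∀ a ∈ U, pvKey a = 1) →
    PySem.List.insertBy (fun a b => decide (pvKey a < pvKey b)) x (L ++ U) = (L ++ [x]) ++ U := by
  intro L
  induction L with
  | nil =>
    intro U _ hU
    cases U with
    | nil => simp [PySem.List.insertBy]
    | cons u U' =>
      have hu : pvKey u = 1 := hU u (by simp)
      simp [PySem.List.insertBy, hx, hu]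
  | cons l L' ih =>
    intro U hL hU
    have hl : pvKey l = 0 := hL l (by simp)
    have := ih U (fun a ha => hL a (by simp [ha])) hU
    simp [PySem.List.insertBy, hx, hl, this]

-- inserting a key-1 element goes to the very end
theorem pvIns1 (x : Char) (hx : pvKey x = 1) (ys : List Char) :
    PySem.List.insertBy (fun a b => decide (pvKey a < pvKey b)) x ys = ys ++ [x] := by
  apply PySem.List.insertBy_of_forall_not_before
  intro y _
  have := pvKey_le_one y
  simp [hx]; omega

-- the insertion-sort fold keeps the accumulator as (key-0 block ++ key-1 block)
theorem pvFoldSort (xs : List Char) : ∀ (L U : List Char),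
    (∀ a ∈ L, pvKey a = 0) → (∀ a ∈ U, pvKey a = 1) →
    xs.foldl (fun acc x => PySem.List.insertBy (fun a b => decide (pvKey a < pvKey b)) x acc) (L ++ U)
      = (L ++ xs.filter (fun c => c == PySem.Chars.lowerChar c))
        ++ (U ++ xs.filter (fun c => !(c == PySem.Chars.lowerChar c))) := by
  induction xs with
  | nil => intro L U _ _; simp
  | cons x xs ih =>
    intro L U hL hU
    by_cases hp : (x == PySem.Chars.lowerChar x) = true
    · have hx : pvKey x = 0 := by simp [pvKey, hp]
      rw [List.foldl_cons, pvIns0 x hx L U hL hU,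
          ih (L ++ [x]) U
            (by intro a ha; rcases List.mem_append.mp ha with h | h
                · exact hL a h
                · simp at h; subst h; exact hx) hU,
          List.filter_cons, List.filter_cons]
      simp [hp]
    · have hx : pvKey x = 1 := by simp [pvKey, hp]
      rw [List.foldl_cons, pvIns1 x hx (L ++ U), List.append_assoc,
          ih L (U ++ [x]) hL
            (by intro a ha; rcases List.mem_append.mp ha with h | h
                · exact hU a h
                · simp at h; subst h; exact hx),
          List.filter_cons, List.filter_cons]
      simp [hp]

-- A's loop accumulates exactly the two filters
theorem pvFoldA (xs : List Char) : ∀ (L U : List Char),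
    xs.foldl (fun (acc : List Char × List Char) ch =>
        if ch == PySem.Chars.lowerChar ch then (acc.1 ++ [ch], acc.2) else (acc.1, acc.2 ++ [ch])) (L, U)
      = (L ++ xs.filter (fun c => c == PySem.Chars.lowerChar c),
         U ++ xs.filter (fun c => !(c == PySem.Chars.lowerChar c))) := by
  induction xs with
  | nil => intro L U; simp
  | cons x xs ih =>
    intro L U
    by_cases hp : (x == PySem.Chars.lowerChar x) = true
    · rw [List.foldl_cons, if_pos hp, ih, List.filter_cons, List.filter_cons]
      simp [hp]
    · rw [List.foldl_cons, if_neg hp, ih, List.filter_cons, List.filter_cons]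
      simp [hp]

-- ===== VERDICT (by name: the statement is the Claim_ definition above) =====
theorem lower_upper_string_spec : Claim_equal_lower_upper_string := by
  intro s _
  unfold Spec_lower_upper_string lower_upper_string lower_upper_string_alt
  rw [PySem.List.sorted_eq_foldl_insertBy]
  have hb := pvFoldSort s.toList [] [] (by simp) (by simp)
  have ha := pvFoldA s.toList [] []
  simp only [List.nil_append] at hb ha
  rw [hb, ha]
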